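-- pv_equiv track=rewrite | github.com/Llunarstack/sdx | utils/training/ar_curriculum.py | parse_ar_order_mix
-- ===== SOURCE A (Python) =====
-- from typing import List, Sequence, Tuple
--
-- _VALID_ORDERS = ("raster", "zorder", "snake", "spiral")
--
-- def parse_ar_order_mix(spec: str | None) -> List[str]:
--     """
--     Parse comma-separated AR orders (e.g. ``"raster,zorder,snake"``).
--
--     Invalid entries are ignored; duplicates are removed while preserving order.
--     """
--     if not spec or not str(spec).strip():
--         return []
--     out: List[str] = []
--     seen = set()
--     for raw_order in str(spec).split(","):
--         order = raw_order.strip().lower()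
--         if not order or order not in _VALID_ORDERS or order in seen:
--             continue
--         seen.add(order)
--         out.append(order)
--     return out
-- ===== SOURCE B (Python) =====
-- from typing import List
--
-- _VALID_ORDERS = ("raster", "zorder", "snake", "spiral")
--
-- def parse_ar_order_mix(spec: str | None) -> List[str]:
--     """
--     Parse comma-separated AR orders (e.g. ``"raster,zorder,snake"``).
--
--     Invalid entries are ignored; duplicates are removed while preserving order.
--     """
--     if not spec or not str(spec).strip():
--         return []
--     tokens = [raw.strip().lower() for raw in str(spec).split(",")]
--     present = [order for order in _VALID_ORDERS if order in tokens]
--     return sorted(present, key=tokens.index)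
-- ===== Notes on version B (the rewrite author's own statement) =====
-- stated objective: alternative
-- what changed: Replaces A's single loop over tokens with a seen-set and an output accumulator by iterating over the four valid order names themselves: filter _VALID_ORDERS by membership in the normalized token list, then sort by first-occurrence index; dedup state disappears because _VALID_ORDERS is already duplicate-free.
import Mathlib
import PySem

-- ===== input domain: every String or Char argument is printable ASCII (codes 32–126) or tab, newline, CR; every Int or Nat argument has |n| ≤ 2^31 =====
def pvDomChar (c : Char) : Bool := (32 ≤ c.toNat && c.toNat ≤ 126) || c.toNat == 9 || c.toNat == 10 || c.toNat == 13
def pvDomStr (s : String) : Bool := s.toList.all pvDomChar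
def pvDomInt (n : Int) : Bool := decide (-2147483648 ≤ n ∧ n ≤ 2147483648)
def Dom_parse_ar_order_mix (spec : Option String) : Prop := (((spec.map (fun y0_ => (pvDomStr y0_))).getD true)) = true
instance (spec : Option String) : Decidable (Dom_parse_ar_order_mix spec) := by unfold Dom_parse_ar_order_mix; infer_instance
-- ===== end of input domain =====

-- B replaces A's seen-set loop by iterating over the four valid orders themselves (filter by
-- membership in the normalized token list, then sort by first-occurrence index) — alternative
-- decomposition, no dedup state needed.
-- NOTE: A simple comparison proof; both ports are return-value only (neither Python mutates its argument).

-- ===== PORT A =====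
def pvValidOrders : List String := ["raster", "zorder", "snake", "spiral"]

-- loop body of A on the already-normalized `order` (the normalization happens at the call site)
def pvStep (st : List String × PySem.Set String) (order : String) : List String × PySem.Set String :=
  if order = "" || !(pvValidOrders.contains order) || st.2.contains order then st
  else (st.1 ++ [order], st.2.add order)

def parse_ar_order_mix (spec : Option String) : List String :=
  match spec with
  | none => []
  | some s =>
    if s = "" || PySem.Str.strip s = "" then []
    else
      (((PySem.Str.split? s ",").getD []).foldl
        (fun st raw_order => pvStep st (PySem.Str.lower (PySem.Str.strip raw_order)))
        ([], PySem.Set.empty)).1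

-- ===== PORT B =====
-- Source B's local `tokens` (normalized split), as a helper
def pvTokens (s : String) : List String :=
  ((PySem.Str.split? s ",").getD []).map (fun raw => PySem.Str.lower (PySem.Str.strip raw))

def parse_ar_order_mix_alt (spec : Option String) : List String :=
  match spec with
  | none => []
  | some s =>
    if s = "" || PySem.Str.strip s = "" then []
    else
      -- key=tokens.index: Source B only ever applies it to members of tokens, where Python's
      -- list.index equals List.idxOf (so no ValueError occurs)
      PySem.List.sorted (pvValidOrders.filter (fun order => (pvTokens s).contains order))
        (fun order => (pvTokens s).idxOf order)

-- ===== PRECONDITION & SPEC =====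
def Spec_parse_ar_order_mix (spec : Option String) (out : List String) : Prop := out = parse_ar_order_mix_alt spec
instance (spec : Option String) (out : List String) : Decidable (Spec_parse_ar_order_mix spec out) := by unfold Spec_parse_ar_order_mix; infer_instance

-- ===== CLAIM (what is proved, stated in full; the proofs are below) =====
def Claim_equal_parse_ar_order_mix : Prop := ∀ (spec : Option String), Dom_parse_ar_order_mix spec → Spec_parse_ar_order_mix spec (parse_ar_order_mix spec)

-- ===== LEMMAS AND PROOFS =====

-- the list A's loop produces, as a structural recursion (proof helper)
def pvFirsts : List String → List String → List String
  | [], _ => []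
  | t :: r, seen =>
    if t ≠ "" ∧ t ∈ pvValidOrders ∧ t ∉ seen then t :: pvFirsts r (t :: seen)
    else pvFirsts r seen

theorem pvValid_ne_empty : ∀ x ∈ pvValidOrders, x ≠ "" := by decide

theorem mem_pvFirsts : ∀ (ts seen : List String) (x : String),
    x ∈ pvFirsts ts seen ↔ x ∈ ts ∧ x ∈ pvValidOrders ∧ x ∉ seen := by
  intro ts
  induction ts with
  | nil => simp [pvFirsts]
  | cons t r ih =>
    intro seen x
    by_cases h : t ≠ "" ∧ t ∈ pvValidOrders ∧ t ∉ seen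
    · simp only [pvFirsts, if_pos h, List.mem_cons, ih]
      constructor
      · rintro (rfl | ⟨hr, hv, hs⟩)
        · exact ⟨Or.inl rfl, h.2.1, h.2.2⟩
        · refine ⟨Or.inr hr, hv, fun hx => hs (by simp [hx])⟩
      · rintro ⟨(rfl | hr), hv, hs⟩
        · exact Or.inl rfl
        · by_cases hxt : x = t
          · exact Or.inl hxt
          · exact Or.inr ⟨hr, hv, by simp [hxt, hs]⟩
    · simp only [pvFirsts, if_neg h, ih, List.mem_cons]
      constructor
      · rintro ⟨hr, hv, hs⟩; exact ⟨Or.inr hr, hv, hs⟩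
      · rintro ⟨(rfl | hr), hv, hs⟩
        · exact absurd ⟨pvValid_ne_empty x hv, hv, hs⟩ h
        · exact ⟨hr, hv, hs⟩

theorem pairwise_pvFirsts : ∀ (ts seen : List String),
    (pvFirsts ts seen).Pairwise (fun a b => ts.idxOf a < ts.idxOf b) := by
  intro ts
  induction ts with
  | nil => simp [pvFirsts]
  | cons t r ih =>
    intro seen
    by_cases h : t ≠ "" ∧ t ∈ pvValidOrders ∧ t ∉ seen
    · rw [pvFirsts, if_pos h]
      refine List.Pairwise.cons ?_ ?_
      · intro b hb
        have hbne : t ≠ b := by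
          have := (mem_pvFirsts r (t :: seen) b).1 hb
          intro he; exact this.2.2 (by simp [he])
        rw [List.idxOf_cons_self, List.idxOf_cons_ne _ hbne]
        exact Nat.succ_pos _
      · refine List.Pairwise.imp_of_mem ?_ (ih (t :: seen))
        intro a b ha hb hab
        have hane : t ≠ a := by
          have := (mem_pvFirsts r (t :: seen) a).1 ha
          intro he; exact this.2.2 (by simp [he])
        have hbne : t ≠ b := by
          have := (mem_pvFirsts r (t :: seen) b).1 hb
          intro he; exact this.2.2 (by simp [he])
        rw [List.idxOf_cons_ne _ hane, List.idxOf_cons_ne _ hbne]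
        exact Nat.succ_lt_succ hab
    · rw [pvFirsts, if_neg h]
      refine List.Pairwise.imp_of_mem ?_ (ih seen)
      intro a b ha hb hab
      have hmem := fun x hx => (mem_pvFirsts r seen x).1 hx
      have hane : t ≠ a := by
        intro he
        have hm := hmem a ha
        exact h ⟨by rw [he]; exact pvValid_ne_empty a hm.2.1, by rw [he]; exact hm.2.1,
          by rw [he]; exact hm.2.2⟩
      have hbne : t ≠ b := by
        intro he
        have hm := hmem b hb
        exact h ⟨by rw [he]; exact pvValid_ne_empty b hm.2.1, by rw [he]; exact hm.2.1,
          by rw [he]; exact hm.2.2⟩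
      rw [List.idxOf_cons_ne _ hane, List.idxOf_cons_ne _ hbne]
      exact Nat.succ_lt_succ hab

theorem nodup_pvFirsts (ts seen : List String) : (pvFirsts ts seen).Nodup := by
  refine List.Pairwise.imp ?_ (pairwise_pvFirsts ts seen)
  intro a b hab he
  exact absurd hab (by rw [he]; exact lt_irrefl _)

-- A's fold, expressed through pvFirsts (the Set `S` and the list `seen` agree as sets)
theorem foldA_eq : ∀ (ts out : List String) (S : PySem.Set String) (seen : List String),
    (∀ x, x ∈ S ↔ x ∈ seen) →
    (ts.foldl pvStep (out, S)).1 = out ++ pvFirsts ts seen := by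
  intro ts
  induction ts with
  | nil => intro out S seen _; simp [pvFirsts]
  | cons t r ih =>
    intro out S seen hinv
    have hSc : S.contains t = true ↔ t ∈ seen := by
      rw [show S.contains t = List.contains S t from rfl, List.contains_iff_mem]
      exact hinv t
    by_cases hc : t = "" ∨ t ∉ pvValidOrders ∨ t ∈ seen
    · have hcond : (decide (t = "") || !pvValidOrders.contains t || S.contains t) = true := by
        rw [Bool.or_eq_true, Bool.or_eq_true]
        rcases hc with h | h | h
        · exact Or.inl (Or.inl (by simp [h]))
        · exact Or.inl (Or.inr (by simp [h]))
        · exact Or.inr (hSc.2 h)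
      have hfn : ¬ (t ≠ "" ∧ t ∈ pvValidOrders ∧ t ∉ seen) := by tauto
      have hstep : pvStep (out, S) t = (out, S) := by
        unfold pvStep; rw [hcond]; rfl
      rw [List.foldl_cons, hstep, pvFirsts, if_neg hfn]
      exact ih out S seen hinv
    · rw [not_or, not_or, not_not] at hc
      obtain ⟨hne, hv, hns⟩ := hc
      have hcond : (decide (t = "") || !pvValidOrders.contains t || S.contains t) = false := by
        rw [Bool.or_eq_false_iff, Bool.or_eq_false_iff]
        refine ⟨⟨by simp [hne], by simp [hv]⟩, ?_⟩
        exact Bool.eq_false_iff.2 (fun hcc => hns (hSc.1 hcc))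
      have hstep : pvStep (out, S) t = (out ++ [t], S.add t) := by
        unfold pvStep; rw [hcond]; rfl
      have hinv' : ∀ x, x ∈ S.add t ↔ x ∈ t :: seen := by
        intro x
        rw [PySem.Set.mem_add, List.mem_cons, hinv x]
        tauto
      rw [List.foldl_cons, hstep, pvFirsts, if_pos ⟨hne, hv, hns⟩,
        ih (out ++ [t]) (S.add t) (t :: seen) hinv']
      simp

-- B's sorted filter, identified with pvFirsts via its permutation + strict key order
theorem sorted_eq_pvFirsts (tokens : List String) :
    PySem.List.sorted (pvValidOrders.filter (fun order => tokens.contains order))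
      (fun order => tokens.idxOf order) = pvFirsts tokens [] := by
  refine PySem.List.sorted_eq_of_perm_of_pairwise_lt _ _ _ ?_ ?_
  · refine List.perm_of_nodup_nodup_toFinset_eq (nodup_pvFirsts tokens [])
      (List.Nodup.filter _ (by decide)) ?_
    ext x
    simp [mem_pvFirsts, and_comm]
  · exact pairwise_pvFirsts tokens []

-- ===== VERDICT (by name: the statement is the Claim_ definition above) =====
theorem parse_ar_order_mix_spec : Claim_equal_parse_ar_order_mix := by
  intro spec _
  unfold Spec_parse_ar_order_mix
  cases spec with
  | none => rfl
  | some s =>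
    simp only [parse_ar_order_mix, parse_ar_order_mix_alt, pvTokens]
    by_cases hg : (s = "" || PySem.Str.strip s = "") = true
    · rw [if_pos hg, if_pos hg]
    · rw [if_neg hg, if_neg hg]
      rw [← List.foldl_map]
      rw [foldA_eq _ [] PySem.Set.empty [] (by intro x; simp [PySem.Set.empty])]
      rw [sorted_eq_pvFirsts]
      simp
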